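-- pv_equiv track=rewrite | github.com/MarcusHomunculus/PathClassifierPrototype | matcher/xml/path/PathOperations.py | is_child_path_except_for
-- ===== SOURCE A (Python) =====
-- def is_child_path_except_for(to_check: str, base_path: str) -> int:
--     # TODO: doc me
--     first_path = to_check.split("/")
--     second_path = base_path.split("/")
--     if len(first_path) > len(second_path):
--         raise AttributeError("First argument should be a child path of the 2nd: {} vs {}".format(
--             to_check, base_path))
--     for i in range(len(first_path)):
--         if i >= len(second_path):
--             # only return the rest
--             return len(first_path) - len(second_path)
--         if first_path[i] != second_path[i]:
--             return len(first_path) - i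
--     # then they are equal
--     return 0
-- ===== SOURCE B (Python) =====
-- def is_child_path_except_for(to_check: str, base_path: str) -> int:
--     # recursive decomposition: strip the common leading components, the answer
--     # is the number of components left of the first path
--     first_path = to_check.split("/")
--     second_path = base_path.split("/")
--     if len(first_path) > len(second_path):
--         raise AttributeError("First argument should be a child path of the 2nd: {} vs {}".format(
--             to_check, base_path))
--     def remaining(a, b):
--         if a and a[0] == b[0]:
--             return remaining(a[1:], b[1:])
--         return len(a)
--     return remaining(first_path, second_path)
-- ===== Notes on version B (the rewrite author's own statement) =====
-- stated objective: simpler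
-- what changed: Replaces the index loop with its per-index branches and three return sites by a recursive helper that strips the common leading components and returns the length of what remains of the first path.
import Mathlib
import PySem

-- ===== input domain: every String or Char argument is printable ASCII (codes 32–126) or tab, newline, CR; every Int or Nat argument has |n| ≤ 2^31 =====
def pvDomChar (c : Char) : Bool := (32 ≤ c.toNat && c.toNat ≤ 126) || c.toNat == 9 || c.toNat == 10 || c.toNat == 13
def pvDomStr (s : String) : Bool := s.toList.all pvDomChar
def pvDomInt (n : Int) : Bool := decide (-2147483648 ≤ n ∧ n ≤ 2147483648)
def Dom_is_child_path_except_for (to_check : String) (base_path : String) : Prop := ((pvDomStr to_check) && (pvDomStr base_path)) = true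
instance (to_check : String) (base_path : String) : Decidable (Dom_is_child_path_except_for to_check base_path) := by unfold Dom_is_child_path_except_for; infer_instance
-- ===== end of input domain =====

-- B replaces A's first-mismatch index scan with a recursive helper that strips the
-- common leading components; objective: simpler decomposition, same cost.

-- ===== PORT A =====
-- A's for-loop over range(len(first_path)), transliterated as recursion on the index i.
def isChildLoopA (first second : List (List Char)) (i : Nat) : Int :=
  if i < first.length then
    if i ≥ second.length then (first.length : Int) - (second.length : Int)
    else if first.getD i [] ≠ second.getD i [] then (first.length : Int) - (i : Int)
    else isChildLoopA first second (i + 1)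
  else 0
termination_by first.length - i

def is_child_path_except_for (to_check : String) (base_path : String) : Int :=
  let first_path := PySem.Chars.splitOn to_check.toList "/".toList
  let second_path := PySem.Chars.splitOn base_path.toList "/".toList
  if first_path.length > second_path.length then 0  -- Python raises AttributeError here; excluded by Pre_
  else isChildLoopA first_path second_path 0

-- ===== PORT B =====
-- B's recursive helper 'remaining': if a nonempty and heads equal, recurse on the tails, else len(a).
def isChildRemainingB : List (List Char) → List (List Char) → Int
  | x :: xs, y :: ys => if x == y then isChildRemainingB xs ys else (xs.length : Int) + 1
  | a, _ => (a.length : Int)  -- a = [] on Pre_ inputs (len a ≤ len b throughout)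

def is_child_path_except_for_alt (to_check : String) (base_path : String) : Int :=
  let first_path := PySem.Chars.splitOn to_check.toList "/".toList
  let second_path := PySem.Chars.splitOn base_path.toList "/".toList
  if first_path.length > second_path.length then 0  -- Python raises AttributeError here; excluded by Pre_
  else isChildRemainingB first_path second_path

-- ===== PRECONDITION & SPEC =====
-- Pre_ excludes exactly the inputs where A raises AttributeError (first path longer than second).
def Pre_is_child_path_except_for (to_check : String) (base_path : String) : Prop :=
  (PySem.Chars.splitOn to_check.toList "/".toList).length ≤ (PySem.Chars.splitOn base_path.toList "/".toList).length
instance (to_check : String) (base_path : String) : Decidable (Pre_is_child_path_except_for to_check base_path) := by unfold Pre_is_child_path_except_for; infer_instance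
def pvWitness_is_child_path_except_for : String × String := ("a/b", "a/b/c")

def Spec_is_child_path_except_for (to_check : String) (base_path : String) (out : Int) : Prop := out = is_child_path_except_for_alt to_check base_path
instance (to_check : String) (base_path : String) (out : Int) : Decidable (Spec_is_child_path_except_for to_check base_path out) := by unfold Spec_is_child_path_except_for; infer_instance

-- ===== CLAIM (what is proved, stated in full; the proofs are below) =====
def Claim_equal_is_child_path_except_for : Prop := ∀ (to_check : String) (base_path : String), Dom_is_child_path_except_for to_check base_path → Pre_is_child_path_except_for to_check base_path → Spec_is_child_path_except_for to_check base_path (is_child_path_except_for to_check base_path)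

-- ===== LEMMAS AND PROOFS =====

-- Core invariant: A's index loop from i equals B's recursion on the dropped suffixes.
lemma loop_eq_remaining (first second : List (List Char)) (i : Nat)
    (h2 : first.length ≤ second.length) :
    isChildLoopA first second i = isChildRemainingB (first.drop i) (second.drop i) := by
  by_cases h : i < first.length
  · have hs : i < second.length := lt_of_lt_of_le h h2
    rw [isChildLoopA]
    have hge : ¬ (i ≥ second.length) := by omega
    rw [List.drop_eq_getElem_cons h, List.drop_eq_getElem_cons hs]
    by_cases heq : first.getD i [] = second.getD i []
    · have hgf : first.getD i [] = first[i] := List.getD_eq_getElem _ _ h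
      have hgs : second.getD i [] = second[i] := List.getD_eq_getElem _ _ hs
      have ih := loop_eq_remaining first second (i + 1) h2
      rw [if_pos h, if_neg hge, if_neg (not_not_intro heq), ih, isChildRemainingB,
          if_pos (by rw [beq_iff_eq, ← hgf, ← hgs]; exact heq)]
    · have hne : first[i] ≠ second[i] := by
        rwa [List.getD_eq_getElem _ _ h, List.getD_eq_getElem _ _ hs] at heq
      rw [if_pos h, if_neg hge, if_pos heq, isChildRemainingB,
          if_neg (by simpa using hne)]
      have : (first.drop (i+1)).length = first.length - (i+1) := List.length_drop ..
      push_cast [this]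
      omega
  · have hf : first.drop i = [] := List.drop_eq_nil_of_le (by omega)
    rw [isChildLoopA, if_neg h, hf]
    simp [isChildRemainingB]
termination_by first.length - i

-- ===== VERDICT (by name: the statement is the Claim_ definition above) =====
theorem is_child_path_except_for_spec : Claim_equal_is_child_path_except_for := by
  intro to_check base_path _ hpre
  unfold Spec_is_child_path_except_for is_child_path_except_for is_child_path_except_for_alt
  unfold Pre_is_child_path_except_for at hpre
  simp only [if_neg (by omega : ¬ (PySem.Chars.splitOn to_check.toList "/".toList).length > (PySem.Chars.splitOn base_path.toList "/".toList).length)]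
  rw [loop_eq_remaining _ _ 0 hpre]
  simp
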